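-- pv_equiv track=rewrite | github.com/ChsRmb/AdventOfCode | 2021/Day01/tasks.py | sum_three_depth
-- ===== SOURCE A (Python) =====
-- from typing import List
--
-- def sum_three_depth(depths: List[int]) -> List[int]:
--     """
--     Sums of a three-measurement sliding window
--
--     returns a new list of measurements
--     """
--     new_depths = []
--     while len(depths) >= 3:
--         new_dpth = 0
--         for num, dpth in enumerate(depths):
--             if num > 2:
--                 break
--             new_dpth += dpth
--         new_depths.append(new_dpth)
--         del depths[0]
--     return new_depths
-- ===== SOURCE B (Python) =====
-- from typing import List
--
-- def sum_three_depth(depths: List[int]) -> List[int]: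
--     """Sums of a three-measurement sliding window (running window sum, one pass)."""
--     out = []
--     if len(depths) < 3:
--         return out
--     window = depths[0] + depths[1] + depths[2]
--     out.append(window)
--     for i in range(3, len(depths)):
--         window += depths[i] - depths[i - 3]
--         out.append(window)
--     return out
-- ===== Notes on version B (the rewrite author's own statement) =====
-- stated objective: faster
-- what changed: Replaces the destructive while-loop (re-summing the first three elements and deleting the head each iteration, quadratic due to del depths[0]) with a single pass maintaining a running window sum; B also does not mutate the input list.
import Mathlib
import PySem

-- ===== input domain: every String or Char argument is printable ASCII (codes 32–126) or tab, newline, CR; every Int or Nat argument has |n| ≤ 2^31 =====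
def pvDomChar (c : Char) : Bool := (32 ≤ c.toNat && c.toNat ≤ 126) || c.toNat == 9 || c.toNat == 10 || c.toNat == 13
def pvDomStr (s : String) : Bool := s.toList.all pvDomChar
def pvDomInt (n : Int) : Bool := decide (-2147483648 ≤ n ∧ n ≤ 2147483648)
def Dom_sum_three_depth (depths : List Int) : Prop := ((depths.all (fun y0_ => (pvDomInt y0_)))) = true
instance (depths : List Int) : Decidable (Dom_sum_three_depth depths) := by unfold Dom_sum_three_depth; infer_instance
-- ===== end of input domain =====

-- ===== PORT A =====
-- B changes only the algorithm; note: Python A mutates its argument (del depths[0]) — the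
-- equivalence proved here is about the RETURN value only.
-- inner 'for num, dpth in enumerate(depths): if num > 2: break; new_dpth += dpth'
def pvInnerSum : Nat → Int → List Int → Int
  | _, acc, [] => acc
  | num, acc, d :: rest => if num > 2 then acc else pvInnerSum (num + 1) (acc + d) rest

-- 'while len(depths) >= 3: new_depths.append(<sum of first three>); del depths[0]'
def pvLoopA (depths : List Int) (new_depths : List Int) : List Int :=
  if depths.length ≥ 3 then pvLoopA depths.tail (new_depths ++ [pvInnerSum 0 0 depths])
  else new_depths
termination_by depths.length
decreasing_by simp [List.length_tail]; omega

def sum_three_depth (depths : List Int) : List Int := pvLoopA depths []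

-- ===== PORT B =====
-- 'for i in range(3, len(depths)): window += depths[i] - depths[i-3]; out.append(window)'
-- ported with two cursors: old = suffix starting at i-3, rest = suffix starting at i
def pvGoB (window : Int) (old rest acc : List Int) : List Int :=
  match old, rest with
  | o :: os, r :: rs => pvGoB (window + r - o) os rs (acc ++ [window + r - o])
  | _, _ => acc

def sum_three_depth_alt (depths : List Int) : List Int :=
  match depths with
  | a :: b :: c :: rest => pvGoB (a + b + c) (a :: b :: c :: rest) rest [a + b + c]
  | _ => []

-- ===== PRECONDITION & SPEC =====
def Spec_sum_three_depth (depths : List Int) (out : List Int) : Prop := out = sum_three_depth_alt depths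
instance (depths : List Int) (out : List Int) : Decidable (Spec_sum_three_depth depths out) := by unfold Spec_sum_three_depth; infer_instance

-- ===== CLAIM (what is proved, stated in full; the proofs are below) =====
def Claim_equal_sum_three_depth : Prop := ∀ (depths : List Int), Dom_sum_three_depth depths → Spec_sum_three_depth depths (sum_three_depth depths)

-- ===== LEMMAS AND PROOFS =====
-- reference form: the sliding-window sums, by structural descent
def pvSpecAll : List Int → List Int
  | a :: b :: c :: rest => (a + b + c) :: pvSpecAll (b :: c :: rest)
  | _ => []
termination_by l => l.length

def pvSpecW (b c : Int) : List Int → List Int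
  | [] => []
  | d :: rs => (b + c + d) :: pvSpecW c d rs

theorem pvInnerSum_first3 (a b c : Int) (rest : List Int) :
    pvInnerSum 0 0 (a :: b :: c :: rest) = a + b + c := by
  cases rest <;> simp [pvInnerSum]

theorem pvLoopA_eq (l : List Int) (acc : List Int) :
    pvLoopA l acc = acc ++ pvSpecAll l := by
  fun_induction pvLoopA l acc with
  | case1 l acc h ih =>
    match l, h with
    | a :: b :: c :: rest, _ =>
      simp only [List.tail_cons] at ih ⊢
      rw [ih, pvInnerSum_first3]
      simp [pvSpecAll]
  | case2 l acc h =>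
    match l with
    | [] => simp [pvSpecAll]
    | [a] => simp [pvSpecAll]
    | [a, b] => simp [pvSpecAll]
    | a :: b :: c :: rest => simp at h

theorem pvGoB_eq (rest : List Int) : ∀ (a b c : Int) (acc : List Int),
    pvGoB (a + b + c) (a :: b :: c :: rest) rest acc = acc ++ pvSpecW b c rest := by
  induction rest with
  | nil => intro a b c acc; simp [pvGoB, pvSpecW]
  | cons d rs ih =>
    intro a b c acc
    have h : a + b + c + d - a = b + c + d := by ring
    simp only [pvGoB, h, pvSpecW]
    rw [ih b c d (acc ++ [b + c + d])]
    simp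

theorem pvSpecW_eq (rest : List Int) : ∀ (b c : Int),
    pvSpecAll (b :: c :: rest) = pvSpecW b c rest := by
  induction rest with
  | nil => intro b c; simp [pvSpecAll, pvSpecW]
  | cons d rs ih => intro b c; rw [pvSpecAll, pvSpecW, ih]

theorem pvAlt_eq (l : List Int) : sum_three_depth_alt l = pvSpecAll l := by
  match l with
  | [] => simp [sum_three_depth_alt, pvSpecAll]
  | [a] => simp [sum_three_depth_alt, pvSpecAll]
  | [a, b] => simp [sum_three_depth_alt, pvSpecAll]
  | a :: b :: c :: rest =>
    simp only [sum_three_depth_alt]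
    rw [pvGoB_eq, ← pvSpecW_eq]
    simp [pvSpecAll]

-- ===== VERDICT (by name: the statement is the Claim_ definition above) =====
theorem sum_three_depth_spec : Claim_equal_sum_three_depth := by
  intro depths _
  unfold Spec_sum_three_depth
  rw [pvAlt_eq, sum_three_depth, pvLoopA_eq, List.nil_append]
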